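-- pv_equiv track=rewrite | github.com/lixiang2017/leetcode | explore/2021/january/Create_Sorted_Array_through_Instructions.2.py | createSortedArray
-- ===== SOURCE A (Python) =====
-- import bisect
--
-- MOD = 10 ** 9 + 7
--
-- def createSortedArray(instructions):
--     """
--     :type instructions: List[int]
--     :rtype: int
--     """
--     total_cost = 0
--     less = greater = 0
--     nums = []
--     for instr in instructions:
--         less = bisect.bisect_left(nums, instr)
--         greater = bisect.bisect_right(nums, instr)
--         total_cost += min(less, len(nums) - greater)
--         nums.insert(greater, instr)
--
--     return total_cost % MOD
-- ===== SOURCE B (Python) =====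
-- MOD = 10 ** 9 + 7
--
-- def createSortedArray(instructions):
--     total = 0
--     seen = []
--     for x in instructions:
--         less = 0
--         greater = 0
--         for y in seen:
--             if y < x:
--                 less += 1
--             elif y > x:
--                 greater += 1
--         total += min(less, greater)
--         seen.append(x)
--     return total % MOD
-- ===== Notes on version B (the rewrite author's own statement) =====
-- stated objective: alternative
-- what changed: B drops the sorted array, the two binary searches and the positional insert entirely: it keeps the prefix unsorted and counts strictly-smaller and strictly-greater earlier elements by a direct scan of the prefix.
import Mathlib
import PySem

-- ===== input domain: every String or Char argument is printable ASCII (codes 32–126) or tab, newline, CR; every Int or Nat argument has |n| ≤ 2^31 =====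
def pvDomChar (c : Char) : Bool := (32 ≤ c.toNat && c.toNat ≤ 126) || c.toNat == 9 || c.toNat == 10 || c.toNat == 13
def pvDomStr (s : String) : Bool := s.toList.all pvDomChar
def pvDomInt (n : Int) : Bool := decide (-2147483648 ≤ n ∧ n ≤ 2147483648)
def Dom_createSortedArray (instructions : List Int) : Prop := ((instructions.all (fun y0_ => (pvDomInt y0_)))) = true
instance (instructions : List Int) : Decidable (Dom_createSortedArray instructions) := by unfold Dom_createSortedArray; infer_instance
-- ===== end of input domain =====

-- B replaces A's sorted array + two binary searches + positional insert by a direct scan of the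
-- (unsorted) prefix counting strictly-smaller and strictly-greater earlier elements (objective:
-- alternative decomposition, same asymptotic cost).

-- ===== PORT A =====
-- bisect.bisect_left / bisect_right, ported as the equivalent insertion-point recursion;
-- exact on sorted lists, and A's nums list is sorted at every step (proved below).
def bisectLeft : List Int → Int → Nat
  | [], _ => 0
  | y :: ys, x => if y < x then bisectLeft ys x + 1 else 0

def bisectRight : List Int → Int → Nat
  | [], _ => 0
  | y :: ys, x => if y ≤ x then bisectRight ys x + 1 else 0

def stepA (st : Int × List Int) (instr : Int) : Int × List Int :=
  let less := bisectLeft st.2 instr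
  let greater := bisectRight st.2 instr
  (st.1 + min (less : Int) ((st.2.length : Int) - (greater : Int)),
   PySem.List.insert st.2 (greater : Int) instr)

def createSortedArray (instructions : List Int) : Int :=
  PySem.Int.mod (instructions.foldl stepA (0, [])).1 (10 ^ 9 + 7)

-- ===== PORT B =====
def stepB (st : Int × List Int) (x : Int) : Int × List Int :=
  let counts := st.2.foldl
    (fun (lg : Int × Int) y =>
      if y < x then (lg.1 + 1, lg.2) else if x < y then (lg.1, lg.2 + 1) else lg)
    (0, 0)
  (st.1 + min counts.1 counts.2, st.2 ++ [x])

def createSortedArray_alt (instructions : List Int) : Int :=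
  PySem.Int.mod (instructions.foldl stepB (0, [])).1 (10 ^ 9 + 7)

-- ===== PRECONDITION & SPEC =====
def Spec_createSortedArray (instructions : List Int) (out : Int) : Prop := out = createSortedArray_alt instructions
instance (instructions : List Int) (out : Int) : Decidable (Spec_createSortedArray instructions out) := by unfold Spec_createSortedArray; infer_instance

-- ===== CLAIM (what is proved, stated in full; the proofs are below) =====
def Claim_equal_createSortedArray : Prop := ∀ (instructions : List Int), Dom_createSortedArray instructions → Spec_createSortedArray instructions (createSortedArray instructions)

-- ===== LEMMAS AND PROOFS =====

-- number of elements of l strictly below / strictly above x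
def cntLt (l : List Int) (x : Int) : Nat := (l.filter (fun y => decide (y < x))).length
def cntGt (l : List Int) (x : Int) : Nat := (l.filter (fun y => decide (x < y))).length

lemma bisectRight_le_length (l : List Int) (x : Int) : bisectRight l x ≤ l.length := by
  induction l with
  | nil => simp [bisectRight]
  | cons y ys ih =>
    simp only [bisectRight, List.length_cons]
    split <;> omega

lemma bisectLeft_sorted (l : List Int) (x : Int) (h : l.Pairwise (· ≤ ·)) :
    bisectLeft l x = cntLt l x := by
  induction l with
  | nil => simp [bisectLeft, cntLt]
  | cons y ys ih =>
    rcases List.pairwise_cons.mp h with ⟨hy, hys⟩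
    by_cases hlt : y < x
    · simp [bisectLeft, cntLt, hlt] at ih ⊢
      exact ih hys
    · have : ∀ z ∈ ys, ¬ z < x := fun z hz => by have := hy z hz; omega
      simp only [bisectLeft, cntLt, if_neg hlt]
      rw [List.filter_cons_of_neg (by simpa using hlt)]
      rw [List.filter_eq_nil_iff.mpr (fun z hz => by simpa using this z hz)]
      rfl

lemma bisectRight_sorted (l : List Int) (x : Int) (h : l.Pairwise (· ≤ ·)) :
    l.length - bisectRight l x = cntGt l x := by
  induction l with
  | nil => simp [bisectRight, cntGt]
  | cons y ys ih =>
    rcases List.pairwise_cons.mp h with ⟨hy, hys⟩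
    by_cases hle : y ≤ x
    · have hnx : ¬ x < y := by omega
      simp only [bisectRight, cntGt, if_pos hle, List.length_cons]
      rw [List.filter_cons_of_neg (by simpa using hnx)]
      have := ih hys
      simp only [cntGt] at this
      omega
    · have hall : ∀ z ∈ y :: ys, x < z := by
        intro z hz
        rcases List.mem_cons.mp hz with rfl | hz
        · omega
        · have := hy z hz; omega
      simp only [bisectRight, cntGt, if_neg hle]
      rw [List.filter_eq_self.mpr (fun z hz => by simpa using hall z hz)]
      simp

-- A's insert at bisectRight, in recursive form
lemma insert_bisectRight (l : List Int) (x : Int) :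
    PySem.List.insert l ((bisectRight l x : Nat) : Int) x
      = l.take (bisectRight l x) ++ x :: l.drop (bisectRight l x) :=
  PySem.List.insert_natCast l _ x (bisectRight_le_length l x)

lemma insert_perm (l : List Int) (x : Int) :
    (l.take (bisectRight l x) ++ x :: l.drop (bisectRight l x)).Perm (x :: l) := by
  have h := List.perm_middle (a := x) (l₁ := l.take (bisectRight l x))
    (l₂ := l.drop (bisectRight l x))
  rwa [List.take_append_drop] at h

lemma insert_sorted (l : List Int) (x : Int) (h : l.Pairwise (· ≤ ·)) :
    (l.take (bisectRight l x) ++ x :: l.drop (bisectRight l x)).Pairwise (· ≤ ·) := by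
  induction l with
  | nil => simp [bisectRight]
  | cons y ys ih =>
    rcases List.pairwise_cons.mp h with ⟨hy, hys⟩
    by_cases hle : y ≤ x
    · simp only [bisectRight, if_pos hle, List.take_succ_cons, List.drop_succ_cons,
        List.cons_append]
      refine List.pairwise_cons.mpr ⟨?_, ih hys⟩
      intro z hz
      have := (insert_perm ys x).mem_iff.mp hz
      rcases List.mem_cons.mp this with rfl | hz'
      · exact hle
      · exact hy z hz'
    · simp only [bisectRight, if_neg hle, List.take_zero, List.drop_zero, List.nil_append]
      refine List.pairwise_cons.mpr ⟨?_, h⟩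
      intro z hz
      rcases List.mem_cons.mp hz with rfl | hz'
      · omega
      · have := hy z hz'; omega

-- B's inner fold counts strictly-smaller / strictly-greater elements
lemma countFold (x : Int) (l : List Int) : ∀ a b : Int,
    l.foldl (fun (lg : Int × Int) y =>
      if y < x then (lg.1 + 1, lg.2) else if x < y then (lg.1, lg.2 + 1) else lg) (a, b)
      = (a + (cntLt l x : Int), b + (cntGt l x : Int)) := by
  induction l with
  | nil => intro a b; simp [cntLt, cntGt]
  | cons y ys ih =>
    intro a b
    by_cases h1 : y < x
    · have hnx : ¬ x < y := by omega
      simp only [List.foldl_cons, if_pos h1, ih, cntLt, cntGt]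
      rw [List.filter_cons_of_pos (by simpa using h1), List.filter_cons_of_neg (by simpa using hnx)]
      simp only [List.length_cons]
      simp only [Prod.mk.injEq]
      constructor <;> first | trivial | (push_cast; ring)
    · by_cases h2 : x < y
      · simp only [List.foldl_cons, if_neg h1, if_pos h2, ih, cntLt, cntGt]
        rw [List.filter_cons_of_neg (by simpa using h1), List.filter_cons_of_pos (by simpa using h2)]
        simp only [List.length_cons]
        simp only [Prod.mk.injEq]
        constructor <;> first | trivial | (push_cast; ring)
      · simp only [List.foldl_cons, if_neg h1, if_neg h2, ih, cntLt, cntGt]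
        rw [List.filter_cons_of_neg (by simpa using h1), List.filter_cons_of_neg (by simpa using h2)]

lemma cnt_perm_lt (l m : List Int) (hp : l.Perm m) (x : Int) : cntLt l x = cntLt m x :=
  (hp.filter _).length_eq

lemma cnt_perm_gt (l m : List Int) (hp : l.Perm m) (x : Int) : cntGt l x = cntGt m x :=
  (hp.filter _).length_eq

lemma main_invariant (l : List Int) : ∀ (t : Int) (nums seen : List Int),
    nums.Pairwise (· ≤ ·) → nums.Perm seen →
    (l.foldl stepA (t, nums)).1 = (l.foldl stepB (t, seen)).1 := by
  induction l with
  | nil => intro t nums seen _ _; rfl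
  | cons x xs ih =>
    intro t nums seen hs hp
    simp only [List.foldl_cons]
    have hA : stepA (t, nums) x =
        (t + min ((cntLt nums x : Nat) : Int) ((cntGt nums x : Nat) : Int),
         nums.take (bisectRight nums x) ++ x :: nums.drop (bisectRight nums x)) := by
      simp only [stepA, insert_bisectRight, bisectLeft_sorted nums x hs]
      have h1 : (nums.length : Int) - (bisectRight nums x : Int) = ((cntGt nums x : Nat) : Int) := by
        have := bisectRight_sorted nums x hs
        have := bisectRight_le_length nums x
        omega
      rw [h1]
    have hB : stepB (t, seen) x =
        (t + min ((cntLt seen x : Nat) : Int) ((cntGt seen x : Nat) : Int), seen ++ [x]) := by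
      simp only [stepB, countFold x seen 0 0, zero_add]
    rw [hA, hB]
    rw [cnt_perm_lt nums seen hp, cnt_perm_gt nums seen hp]
    apply ih
    · exact insert_sorted nums x hs
    · exact ((insert_perm nums x).trans (hp.cons x)).trans (List.perm_append_singleton x seen).symm

-- ===== VERDICT (by name: the statement is the Claim_ definition above) =====
theorem createSortedArray_spec : Claim_equal_createSortedArray := by
  intro instructions _
  unfold Spec_createSortedArray createSortedArray createSortedArray_alt
  have := main_invariant instructions 0 [] [] (by simp) (by simp)
  rw [this]
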